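-- pv_equiv track=rewrite | github.com/deploymenttheory/terraform-provider-microsoft365 | scripts/pipeline/permissions/get_utilised_graph_api_endpoints.py | _extract_chain_method_names
-- ===== SOURCE A (Python) =====
-- def _extract_chain_method_names(chain: str) -> list[str]:
--     """
--     Extract top-level method names from a Go SDK method-chain string.
--
--     Uses a parenthesis-depth tracker so that nested calls inside argument
--     lists (e.g. ``ByDeviceCategoryId(obj.ID.ValueString())``) are not
--     mistakenly collected as chain path segments.
--
--     Args:
--         chain: The chain portion between ``.client.`` and ``.HttpMethod(ctx``.
--
--     Returns:
--         Ordered list of top-level method names in the chain.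
--     """
--     methods: list[str] = []
--     current: list[str] = []
--     depth = 0
--     # Start True so the very first method name (no leading '.') is captured
--     after_dot = True
--
--     for char in chain:
--         if depth == 0:
--             if char == '.':
--                 current = []
--                 after_dot = True
--             elif after_dot and (char.isalnum() or char == '_'):
--                 current.append(char)
--             elif after_dot and char == '(':
--                 name = ''.join(current)
--                 if name:
--                     methods.append(name)
--                 current = []
--                 after_dot = False
--                 depth = 1
--             elif char == '(':
--                 depth = 1
--                 after_dot = False
--                 current = []
--             else:
--                 after_dot = False
--                 current = []
--         else:
--             if char == '(':
--                 depth += 1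
--             elif char == ')':
--                 depth -= 1
--
--     return methods
-- ===== SOURCE B (Python) =====
-- def _extract_chain_method_names(chain: str) -> list[str]:
--     # Pass 1: split the chain into top-level segments at '.' seen at
--     # parenthesis depth 0 (dots inside parens stay within a segment).
--     segments: list[str] = []
--     cur = ""
--     depth = 0
--     for ch in chain:
--         if depth == 0 and ch == '.':
--             segments.append(cur)
--             cur = ""
--         else:
--             cur += ch
--             if ch == '(':
--                 depth += 1
--             elif ch == ')' and depth > 0:
--                 depth -= 1
--     segments.append(cur)
--     # Pass 2: for each segment, take the leading identifier run only if it
--     # is nonempty and immediately followed by '('.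
--     names: list[str] = []
--     for seg in segments:
--         j = 0
--         while j < len(seg) and (seg[j].isalnum() or seg[j] == '_'):
--             j += 1
--         if 0 < j < len(seg) and seg[j] == '(':
--             names.append(seg[:j])
--     return names
-- ===== Notes on version B (the rewrite author's own statement) =====
-- stated objective: simpler
-- what changed: Replaces A's single scan with inline state-machine emission (current buffer, depth, after_dot flag) by two small passes: first split the chain into top-level segments at depth-0 dots, then extract each segment's leading identifier run when it is immediately followed by an opening parenthesis.
import Mathlib
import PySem

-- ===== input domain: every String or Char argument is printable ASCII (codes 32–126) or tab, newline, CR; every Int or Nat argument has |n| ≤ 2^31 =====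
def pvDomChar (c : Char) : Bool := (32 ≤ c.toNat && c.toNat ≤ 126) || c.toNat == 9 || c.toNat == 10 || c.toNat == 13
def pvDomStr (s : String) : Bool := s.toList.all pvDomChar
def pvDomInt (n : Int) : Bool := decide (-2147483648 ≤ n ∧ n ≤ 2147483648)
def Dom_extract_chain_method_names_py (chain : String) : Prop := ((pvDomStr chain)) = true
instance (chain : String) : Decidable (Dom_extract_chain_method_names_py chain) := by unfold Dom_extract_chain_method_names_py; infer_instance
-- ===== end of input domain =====

-- B replaces A's inline emit-during-scan state machine by two passes (split into
-- top-level segments, then extract each segment's leading identifier run when it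
-- is immediately followed by an opening parenthesis): a simpler decomposition, same cost.

-- identifier character: ch.isalnum() or ch == '_' (a test both sources perform)
def pvIdent (c : Char) : Bool := PySem.Chars.isalnum c || c == '_'

-- ===== PORT A =====
-- one step of A's loop; state = (methods, current, depth, after_dot)
def pvAStep : List String × List Char × Int × Bool → Char → List String × List Char × Int × Bool
  | (ms, cur, depth, ad), c =>
    if depth = 0 then
      if c = '.' then (ms, [], depth, true)
      else if ad && pvIdent c then (ms, cur ++ [c], depth, ad)
      else if ad && c = '(' then
        -- `if name:` on name = ''.join(current) is truthy iff current ≠ []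
        ((if cur ≠ [] then ms ++ [String.ofList cur] else ms), [], 1, false)
      else if c = '(' then (ms, [], 1, false)
      else (ms, [], depth, false)
    else
      if c = '(' then (ms, cur, depth + 1, ad)
      else if c = ')' then (ms, cur, depth - 1, ad)
      else (ms, cur, depth, ad)

def extract_chain_method_names_py (chain : String) : List String :=
  (chain.toList.foldl pvAStep ([], [], (0 : Int), true)).1

-- ===== PORT B =====
-- pass 1: split into top-level segments at depth-0 dots
def pvSplitSegs : List Char → Int → List Char → List (List Char)
  | [], _, cur => [cur]
  | c :: cs, depth, cur =>
    if depth = 0 ∧ c = '.' then cur :: pvSplitSegs cs depth []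
    else pvSplitSegs cs
      (if c = '(' then depth + 1
       else if c = ')' ∧ depth > 0 then depth - 1 else depth)
      (cur ++ [c])

-- pass 2 body: the leading identifier run (the while loop computes its length j;
-- seg[:j] is the takeWhile prefix, seg[j] the head of the dropWhile remainder),
-- kept only if nonempty and immediately followed by '('
def pvSegName? (seg : List Char) : Option String :=
  let pre := seg.takeWhile pvIdent
  if pre ≠ [] ∧ (seg.dropWhile pvIdent).head? = some '(' then some (String.ofList pre)
  else none

def extract_chain_method_names_py_alt (chain : String) : List String :=
  (pvSplitSegs chain.toList 0 []).filterMap pvSegName?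

-- ===== PRECONDITION & SPEC =====
def Spec_extract_chain_method_names_py (chain : String) (out : List String) : Prop := out = extract_chain_method_names_py_alt chain
instance (chain : String) (out : List String) : Decidable (Spec_extract_chain_method_names_py chain out) := by unfold Spec_extract_chain_method_names_py; infer_instance

-- ===== CLAIM (what is proved, stated in full; the proofs are below) =====
def Claim_equal_extract_chain_method_names_py : Prop := ∀ (chain : String), Dom_extract_chain_method_names_py chain → Spec_extract_chain_method_names_py chain (extract_chain_method_names_py chain)

-- ===== LEMMAS AND PROOFS =====

theorem pvSegName?_of_all_ident (cur : List Char) (h : ∀ x ∈ cur, pvIdent x) :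
    pvSegName? cur = none := by
  unfold pvSegName?
  rw [List.dropWhile_eq_nil_iff.mpr h]
  simp

theorem pvTakeWhile_lt (p : List Char) (h : p.dropWhile pvIdent ≠ []) :
    ¬ (p.takeWhile pvIdent).length = p.length := by
  have hlen := congrArg List.length (List.takeWhile_append_dropWhile (p := pvIdent) (l := p))
  rw [List.length_append] at hlen
  have : 0 < (p.dropWhile pvIdent).length := List.length_pos_iff.mpr h
  omega

theorem pvSegName?_append (p q : List Char) (h : p.dropWhile pvIdent ≠ []) :
    pvSegName? (p ++ q) = pvSegName? p := by
  unfold pvSegName?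
  rw [List.takeWhile_append, List.dropWhile_append]
  simp only [pvTakeWhile_lt p h, if_false]
  obtain ⟨r, rs, hr⟩ := List.exists_cons_of_ne_nil h
  rw [hr]
  simp

theorem pvSegName?_ident_append (cur : List Char) (c : Char)
    (h : ∀ x ∈ cur, pvIdent x) (hc : pvIdent c = false) :
    pvSegName? (cur ++ [c]) =
      (if cur ≠ [] ∧ c = '(' then some (String.ofList cur) else none) := by
  unfold pvSegName?
  rw [List.takeWhile_append, List.dropWhile_append,
    List.takeWhile_eq_self_iff.mpr h, List.dropWhile_eq_nil_iff.mpr h]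
  simp [hc]

theorem pvDrop_ne_nil_append (p : List Char) (c : Char) (h : p.dropWhile pvIdent ≠ []) :
    (p ++ [c]).dropWhile pvIdent ≠ [] := by
  rw [List.dropWhile_append]
  simp [h]

theorem pvDrop_ne_nil_ident_append (cur : List Char) (c : Char)
    (h : ∀ x ∈ cur, pvIdent x) (hc : pvIdent c = false) :
    (cur ++ [c]).dropWhile pvIdent ≠ [] := by
  rw [List.dropWhile_append, List.dropWhile_eq_nil_iff.mpr h]
  simp [hc]

-- MAIN INVARIANT, one induction over the characters, relating A's scanner states
-- to B's two passes.  P1: depth 0, after_dot, current = cur (all identifier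
-- chars) = B's pending segment.  P23: current = [], after_dot = false, B's
-- pending segment p already determines its name, which A has already appended.
theorem pvMain (cs : List Char) :
    (∀ (ms : List String) (cur : List Char), (∀ x ∈ cur, pvIdent x) →
      (cs.foldl pvAStep (ms, cur, (0 : Int), true)).1 =
        ms ++ (pvSplitSegs cs 0 cur).filterMap pvSegName?)
    ∧ (∀ (ms : List String) (p : List Char) (d : Int), 0 ≤ d →
        p.dropWhile pvIdent ≠ [] →
      (cs.foldl pvAStep (ms ++ (pvSegName? p).toList, [], d, false)).1 =
        ms ++ (pvSplitSegs cs d p).filterMap pvSegName?) := by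
  induction cs with
  | nil =>
    refine ⟨fun ms cur h => ?_, fun ms p d _ _ => ?_⟩
    · simp [pvSplitSegs, pvSegName?_of_all_ident cur h]
    · simp only [List.foldl_nil, pvSplitSegs, List.filterMap_cons, List.filterMap_nil]
      cases pvSegName? p <;> simp
  | cons c cs ih =>
    obtain ⟨ih1, ih23⟩ := ih
    refine ⟨fun ms cur h => ?_, fun ms p d hd hp => ?_⟩
    · -- P1 step
      rw [List.foldl_cons]
      by_cases hdot : c = '.'
      · subst hdot
        have hst : pvAStep (ms, cur, (0 : Int), true) '.' = (ms, [], 0, true) := by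
          simp [pvAStep]
        rw [hst, ih1 ms [] (by simp)]
        simp [pvSplitSegs, pvSegName?_of_all_ident cur h]
      · by_cases hid : pvIdent c = true
        · have hst : pvAStep (ms, cur, (0 : Int), true) c = (ms, cur ++ [c], 0, true) := by
            simp [pvAStep, hdot, hid]
          have hpar : ¬ c = '(' := by rintro rfl; exact absurd hid (by decide)
          rw [hst, ih1 ms (cur ++ [c]) (by
            intro x hx
            rcases List.mem_append.mp hx with h' | h'
            · exact h x h'
            · simpa using (List.mem_singleton.mp h') ▸ hid)]
          simp [pvSplitSegs, hdot, hpar]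
        · have hcF : pvIdent c = false := by
            cases hb : pvIdent c with
            | false => rfl
            | true => exact absurd hb hid
          by_cases hpar : c = '('
          · subst hpar
            have hseg := pvSegName?_ident_append cur '(' h hcF
            have hdw := pvDrop_ne_nil_ident_append cur '(' h hcF
            by_cases hcur : cur = []
            · subst hcur
              have hst : pvAStep (ms, ([] : List Char), (0 : Int), true) '(' =
                  (ms, [], 1, false) := by simp [pvAStep, hcF]
              have hseg0 : pvSegName? (([] : List Char) ++ ['(']) = none := by
                rw [hseg]; simp
              have h23 := ih23 ms (([] : List Char) ++ ['(']) 1 (by norm_num) hdw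
              rw [hseg0] at h23
              simp only [Option.toList_none, List.append_nil] at h23
              rw [hst, h23]
              simp [pvSplitSegs]
            · have hst : pvAStep (ms, cur, (0 : Int), true) '(' =
                  (ms ++ [String.ofList cur], [], 1, false) := by
                simp [pvAStep, hid, hcur]
              have hseg1 : pvSegName? (cur ++ ['(']) = some (String.ofList cur) := by
                rw [hseg]; simp [hcur]
              have h23 := ih23 ms (cur ++ ['(']) 1 (by norm_num) hdw
              rw [hseg1] at h23
              simp only [Option.toList_some] at h23
              rw [hst, h23]
              simp [pvSplitSegs, hdot]
          · -- junk character at depth 0 while capturing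
            have hst : pvAStep (ms, cur, (0 : Int), true) c = (ms, [], 0, false) := by
              simp [pvAStep, hdot, hid, hpar]
            have hseg0 : pvSegName? (cur ++ [c]) = none := by
              rw [pvSegName?_ident_append cur c h hcF]; simp [hpar]
            have h23 := ih23 ms (cur ++ [c]) 0 le_rfl (pvDrop_ne_nil_ident_append cur c h hcF)
            rw [hseg0] at h23
            simp only [Option.toList_none, List.append_nil] at h23
            rw [hst, h23]
            simp [pvSplitSegs, hdot, hpar]
    · -- P23 step
      rw [List.foldl_cons]
      by_cases hd0 : d = 0
      · subst hd0
        by_cases hdot : c = '.'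
        · subst hdot
          have hst : pvAStep (ms ++ (pvSegName? p).toList, [], (0 : Int), false) '.' =
              (ms ++ (pvSegName? p).toList, [], 0, true) := by simp [pvAStep]
          rw [hst, ih1 (ms ++ (pvSegName? p).toList) [] (by simp)]
          simp only [pvSplitSegs, List.append_assoc]
          cases hsp : pvSegName? p <;> simp [hsp]
        · by_cases hpar : c = '('
          · subst hpar
            have hst : pvAStep (ms ++ (pvSegName? p).toList, [], (0 : Int), false) '(' =
                (ms ++ (pvSegName? p).toList, [], 1, false) := by simp [pvAStep]
            have h23 := ih23 ms (p ++ ['(']) 1 (by norm_num) (pvDrop_ne_nil_append p '(' hp)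
            rw [pvSegName?_append p ['('] hp] at h23
            rw [hst, h23]
            simp [pvSplitSegs, hdot]
          · have hst : pvAStep (ms ++ (pvSegName? p).toList, [], (0 : Int), false) c =
                (ms ++ (pvSegName? p).toList, [], 0, false) := by
              simp [pvAStep, hdot, hpar]
            have h23 := ih23 ms (p ++ [c]) 0 le_rfl (pvDrop_ne_nil_append p c hp)
            rw [pvSegName?_append p [c] hp] at h23
            rw [hst, h23]
            simp [pvSplitSegs, hdot, hpar]
      · -- depth > 0
        by_cases hpar : c = '('
        · subst hpar
          have hst : pvAStep (ms ++ (pvSegName? p).toList, [], d, false) '(' =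
              (ms ++ (pvSegName? p).toList, [], d + 1, false) := by
            simp [pvAStep, hd0]
          have h23 := ih23 ms (p ++ ['(']) (d + 1) (by omega) (pvDrop_ne_nil_append p '(' hp)
          rw [pvSegName?_append p ['('] hp] at h23
          rw [hst, h23]
          simp [pvSplitSegs]
        · by_cases hclo : c = ')'
          · subst hclo
            have hst : pvAStep (ms ++ (pvSegName? p).toList, [], d, false) ')' =
                (ms ++ (pvSegName? p).toList, [], d - 1, false) := by
              simp [pvAStep, hd0]
            have h23 := ih23 ms (p ++ [')']) (d - 1) (by omega) (pvDrop_ne_nil_append p ')' hp)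
            rw [pvSegName?_append p [')'] hp] at h23
            rw [hst, h23]
            have hgt : ((')' : Char) = ')' ∧ d > 0) := ⟨rfl, by omega⟩
            simp [pvSplitSegs, hgt]
          · have hst : pvAStep (ms ++ (pvSegName? p).toList, [], d, false) c =
                (ms ++ (pvSegName? p).toList, [], d, false) := by
              simp [pvAStep, hd0, hpar, hclo]
            have h23 := ih23 ms (p ++ [c]) d hd (pvDrop_ne_nil_append p c hp)
            rw [pvSegName?_append p [c] hp] at h23
            rw [hst, h23]
            have hnd : ¬ (d = 0 ∧ c = '.') := by rintro ⟨h0, _⟩; exact hd0 h0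
            have hrp : ¬ (c = ')' ∧ d > 0) := by rintro ⟨h0, _⟩; exact hclo h0
            simp [pvSplitSegs, hnd, hpar, hrp]

-- ===== VERDICT (by name: the statement is the Claim_ definition above) =====
theorem extract_chain_method_names_py_spec : Claim_equal_extract_chain_method_names_py := by
  intro chain _
  unfold Spec_extract_chain_method_names_py extract_chain_method_names_py
    extract_chain_method_names_py_alt
  simpa using (pvMain chain.toList).1 [] [] (by simp)
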